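-- pv_equiv track=rewrite | github.com/abdullahfsm/PCS | simulation/utils/file_name_funcs.py | extract_common
-- ===== SOURCE A (Python) =====
-- def extract_common(fnames,delimiter='_',ignore=['learnt','configs']):
--
-- 	# remove extension
-- 	fnames = [f.split('.')[0] for f in fnames]
--
-- 	common = None
-- 	for f in fnames:
--
-- 		terms = f.split(delimiter)
-- 		terms = [t for t in terms if not (t in ignore)]
--
-- 		if common is None:
-- 			common = terms
-- 		else:
-- 			common = [c for c in common if c in terms]
--
-- 	if common is None:
-- 		return ""
-- 	return delimiter.join(common)
-- ===== SOURCE B (Python) =====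
-- def extract_common(fnames, delimiter='_', ignore=['learnt', 'configs']):
--     if not fnames:
--         return ""
--     token_lists = [[t for t in f.split('.')[0].split(delimiter) if t not in ignore]
--                    for f in fnames]
--     # count, for each token, in how many files it occurs
--     freq = {}
--     for ts in token_lists:
--         for t in dict.fromkeys(ts):
--             freq[t] = freq.get(t, 0) + 1
--     n = len(token_lists)
--     return delimiter.join(t for t in token_lists[0] if freq.get(t, 0) == n)
-- ===== Notes on version B (the rewrite author's own statement) =====
-- stated objective: alternative
-- what changed: B never computes an intersection: it builds a frequency table counting in how many files each token occurs (one pass over each file's distinct tokens), then keeps each token of the first file's list whose count equals the number of files, instead of A's repeatedly re-filtered shrinking common list.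
import Mathlib
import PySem

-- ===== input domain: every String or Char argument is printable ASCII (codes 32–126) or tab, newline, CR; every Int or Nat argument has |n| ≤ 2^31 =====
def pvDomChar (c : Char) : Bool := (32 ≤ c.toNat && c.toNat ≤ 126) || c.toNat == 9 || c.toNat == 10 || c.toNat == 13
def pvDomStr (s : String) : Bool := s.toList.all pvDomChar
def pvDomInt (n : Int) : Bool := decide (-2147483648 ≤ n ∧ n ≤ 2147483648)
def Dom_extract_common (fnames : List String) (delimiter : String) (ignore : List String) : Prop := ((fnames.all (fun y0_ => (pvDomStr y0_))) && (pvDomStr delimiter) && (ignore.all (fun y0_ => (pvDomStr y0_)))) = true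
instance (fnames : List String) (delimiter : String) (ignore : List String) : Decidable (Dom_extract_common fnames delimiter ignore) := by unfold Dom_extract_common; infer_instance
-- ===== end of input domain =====

-- B replaces A's repeatedly re-filtered intersection list by a frequency table:
-- it counts in how many files each token occurs and keeps the first file's tokens
-- whose count equals the number of files (objective: alternative; equal values on Pre_).

-- ===== PORT A =====
-- tokens of one filename: f.split('.')[0].split(delimiter) minus the ignore terms
-- (on Pre_ the delimiter is nonempty whenever it is used, so split?.getD [] is exact)
def pvTermsA (delimiter : String) (ignore : List String) (f : String) : List String :=
  ((PySem.Str.split? (((PySem.Str.split? f ".").getD []).headD "") delimiter).getD []).filter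
    (fun t => !(ignore.contains t))

def extract_common (fnames : List String) (delimiter : String) (ignore : List String) : String :=
  let common : Option (List String) :=
    fnames.foldl
      (fun common f =>
        let terms := pvTermsA delimiter ignore f
        match common with
        | none => some terms
        | some c => some (c.filter (fun x => terms.contains x)))
      none
  match common with
  | none => ""
  | some c => PySem.Str.join delimiter c

-- ===== PORT B =====
def pvTermsB (delimiter : String) (ignore : List String) (f : String) : List String :=
  ((PySem.Str.split? (((PySem.Str.split? f ".").getD []).headD "") delimiter).getD []).filter
    (fun t => !(ignore.contains t))

def extract_common_alt (fnames : List String) (delimiter : String) (ignore : List String) : String :=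
  match fnames with
  | [] => ""
  | _ :: _ =>
    let tls := fnames.map (pvTermsB delimiter ignore)
    -- freq[t] = number of files whose (distinct) tokens contain t
    let freq : PySem.Dict String Int :=
      tls.foldl
        (fun d ts => (PySem.List.dedup ts).foldl (fun d t => d.modify t 0 (· + 1)) d)
        PySem.Dict.empty
    let n : Int := tls.length
    PySem.Str.join delimiter ((tls.headD []).filter (fun t => freq.getD t 0 == n))

-- ===== PRECONDITION & SPEC =====
-- Pre_ excludes exactly the inputs where Python A raises ValueError: an empty delimiter
-- used on a nonempty fnames list ('' is an invalid str.split separator); B raises there too.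
def Pre_extract_common (fnames : List String) (delimiter : String) (ignore : List String) : Prop :=
  fnames = [] ∨ delimiter ≠ ""
instance (fnames : List String) (delimiter : String) (ignore : List String) : Decidable (Pre_extract_common fnames delimiter ignore) := by unfold Pre_extract_common; infer_instance

def pvWitness_extract_common : List String × String × List String :=
  (["run_a_b.txt", "b_a_learnt.txt"], "_", ["learnt", "configs"])

def Spec_extract_common (fnames : List String) (delimiter : String) (ignore : List String) (out : String) : Prop := out = extract_common_alt fnames delimiter ignore
instance (fnames : List String) (delimiter : String) (ignore : List String) (out : String) : Decidable (Spec_extract_common fnames delimiter ignore out) := by unfold Spec_extract_common; infer_instance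

-- ===== CLAIM (what is proved, stated in full; the proofs are below) =====
def Claim_equal_extract_common : Prop := ∀ (fnames : List String) (delimiter : String) (ignore : List String), Dom_extract_common fnames delimiter ignore → Pre_extract_common fnames delimiter ignore → Spec_extract_common fnames delimiter ignore (extract_common fnames delimiter ignore)

-- ===== LEMMAS AND PROOFS =====

-- A's repeated filtering of the running common list equals one filter by "member of every later token list"
theorem foldl_filter_eq (tss : List (List String)) (c : List String) :
    tss.foldl (fun c ts => c.filter (fun x => ts.contains x)) c
      = c.filter (fun x => tss.all (fun ts => ts.contains x)) := by
  induction tss generalizing c with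
  | nil => simp
  | cons ts tss ih =>
    simp only [List.foldl_cons, ih, List.filter_filter, List.all_cons]
    congr 1
    funext x
    exact Bool.and_comm _ _

-- B's frequency fold: the tally of x is the number of token lists that contain x
theorem getD_freq (tss : List (List String)) (d : PySem.Dict String Int) (x : String) :
    (tss.foldl
        (fun d ts => (PySem.List.dedup ts).foldl (fun d t => d.modify t 0 (· + 1)) d)
        d).getD x 0
      = d.getD x 0 + (tss.countP (fun ts => ts.contains x) : Int) := by
  induction tss generalizing d with
  | nil => simp
  | cons ts tss ih =>
    simp only [List.foldl_cons, ih, PySem.Dict.getD_foldl_modify_add_one]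
    have hcnt : (PySem.List.dedup ts).count x = if ts.contains x then 1 else 0 := by
      by_cases hx : x ∈ ts
      · rw [List.count_eq_one_of_mem (PySem.List.nodup_dedup _) ((PySem.List.mem_dedup _ _).mpr hx)]
        simp [List.contains_iff_mem, hx]
      · rw [List.count_eq_zero_of_not_mem (fun h => hx ((PySem.List.mem_dedup _ _).mp h))]
        simp [List.contains_iff_mem, hx]
    rw [List.countP_cons, hcnt]
    by_cases hx : ts.contains x <;> simp [hx] <;> omega

-- ===== VERDICT (by name: the statement is the Claim_ definition above) =====
theorem extract_common_spec : Claim_equal_extract_common := by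
  intro fnames delimiter ignore _ _
  unfold Spec_extract_common extract_common extract_common_alt
  cases fnames with
  | nil => rfl
  | cons f0 rest =>
    simp only [List.foldl_cons, List.map_cons, List.headD_cons]
    have hfold : ∀ (l : List String) (c : List String),
        l.foldl (fun (common : Option (List String)) f =>
            let terms := pvTermsA delimiter ignore f
            match common with
            | none => some terms
            | some c => some (c.filter (fun x => terms.contains x))) (some c)
          = some ((l.map (pvTermsA delimiter ignore)).foldl
              (fun c ts => c.filter (fun x => ts.contains x)) c) := by
      intro l
      induction l with
      | nil => intro c; rfl
      | cons f l ih => intro c; simp only [List.foldl_cons, List.map_cons, ih]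
    rw [hfold]
    simp only [foldl_filter_eq]
    congr 1
    apply List.filter_congr
    intro x hx
    have hAB : pvTermsA delimiter ignore = pvTermsB delimiter ignore := rfl
    rw [hAB] at hx ⊢
    -- B side: unfold the freq tally at x
    rw [getD_freq, PySem.Dict.getD_foldl_modify_add_one]
    simp only [PySem.Dict.getD_empty]
    have hx1 : (PySem.List.dedup (pvTermsB delimiter ignore f0)).count x = 1 :=
      List.count_eq_one_of_mem (PySem.List.nodup_dedup _) ((PySem.List.mem_dedup _ _).mpr hx)
    rw [hx1]
    simp only [List.length_cons]
    set rs := rest.map (pvTermsB delimiter ignore) with hrs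
    have hle : rs.countP (fun ts => ts.contains x) ≤ rs.length := List.countP_le_length
    rw [Bool.eq_iff_iff]
    simp only [List.all_eq_true, beq_iff_eq]
    constructor
    · intro h
      have hc : rs.countP (fun ts => ts.contains x) = rs.length :=
        List.countP_eq_length.mpr (fun a ha => h a ha)
      rw [hc]
      push_cast
      ring
    · intro h
      have hc : rs.countP (fun ts => ts.contains x) = rs.length := by omega
      exact fun a ha => List.countP_eq_length.mp hc a ha
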